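-- pv_equiv track=rewrite | github.com/npuNancy/VoiceFormer | preprocessing/pre_processing.py | get_filename_dict
-- ===== SOURCE A (Python) =====
-- def get_filename_dict(file_list):
--     file_dict = {}
--     for file in file_list:
--         file_label = file.split("_")[0]
--         if file_label not in file_dict:
--             file_dict[file_label] = []
--         file_dict[file_label].append(file)
--     return file_dict
-- ===== SOURCE B (Python) =====
-- def get_filename_dict(file_list):
--     # Alternative decomposition: dedupe labels in first-occurrence order, then
--     # build each group by filtering the whole list per label.
--     labels = list(dict.fromkeys(f.split("_")[0] for f in file_list))
--     return {lab: [f for f in file_list if f.split("_")[0] == lab] for lab in labels}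
-- ===== Notes on version B (the rewrite author's own statement) =====
-- stated objective: alternative
-- what changed: Replaced the single-pass dict-append loop by a two-phase construction: first deduplicate the labels in first-occurrence order (dict.fromkeys), then build each group with a separate filtering pass over the whole list.
import Mathlib
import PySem

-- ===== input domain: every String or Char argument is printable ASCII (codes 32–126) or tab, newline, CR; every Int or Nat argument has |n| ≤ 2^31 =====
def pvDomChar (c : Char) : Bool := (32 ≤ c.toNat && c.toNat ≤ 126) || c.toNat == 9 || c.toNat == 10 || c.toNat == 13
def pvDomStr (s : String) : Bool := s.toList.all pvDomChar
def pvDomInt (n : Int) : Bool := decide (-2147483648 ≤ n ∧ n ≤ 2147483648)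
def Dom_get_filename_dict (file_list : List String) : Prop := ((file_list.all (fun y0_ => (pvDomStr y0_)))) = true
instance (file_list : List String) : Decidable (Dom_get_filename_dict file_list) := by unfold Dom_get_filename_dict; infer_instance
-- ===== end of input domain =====

-- B replaces A's single-pass dict-append loop by deduplicating the labels first and then
-- filtering the list once per label (alternative decomposition, same results).


-- ===== PORT A =====
-- f.split("_")[0]: splitting by a nonempty separator always yields a nonempty list,
-- so the [0] index never raises and equals the head (exact).
def pvLabel (file : String) : String := (((PySem.Str.split? file "_").getD []).headD "")

def get_filename_dict (file_list : List String) : List (String × List String) :=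
  (file_list.foldl
    (fun file_dict file =>
      let file_label := pvLabel file
      let file_dict :=
        if file_dict.contains file_label then file_dict
        else file_dict.insert file_label []
      file_dict.modify file_label [] (fun l => l ++ [file]))
    PySem.Dict.empty).items

-- ===== PORT B =====
def get_filename_dict_alt (file_list : List String) : List (String × List String) :=
  let labels := PySem.List.dedup (file_list.map pvLabel)
  labels.map (fun lab => (lab, file_list.filter (fun f => pvLabel f == lab)))

-- ===== PRECONDITION & SPEC =====
def Spec_get_filename_dict (file_list : List String) (out : List (String × List String)) : Prop := out = get_filename_dict_alt file_list
instance (file_list : List String) (out : List (String × List String)) : Decidable (Spec_get_filename_dict file_list out) := by unfold Spec_get_filename_dict; infer_instance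

-- ===== CLAIM (what is proved, stated in full; the proofs are below) =====
def Claim_equal_get_filename_dict : Prop := ∀ (file_list : List String), Dom_get_filename_dict file_list → Spec_get_filename_dict file_list (get_filename_dict file_list)

-- ===== LEMMAS AND PROOFS =====

-- A's loop body, named for the proofs (let-free form of the fold step; defeq to the port's).
def pvStepA (d : PySem.Dict String (List String)) (file : String) : PySem.Dict String (List String) :=
  (if d.contains (pvLabel file) then d else d.insert (pvLabel file) []).modify
    (pvLabel file) [] (fun l => l ++ [file])

theorem pvA_eq_fold (xs : List String) :
    get_filename_dict xs = (xs.foldl pvStepA PySem.Dict.empty).items := rfl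

theorem pvStepA_getD (d : PySem.Dict String (List String)) (x : String) (c : String) :
    (pvStepA d x).getD c [] = d.getD c [] ++ (if pvLabel x == c then [x] else []) := by
  by_cases hc : c = pvLabel x
  · by_cases h : d.contains (pvLabel x) = true
    · simp [pvStepA, h, hc]
    · simp [pvStepA, h, hc,
        PySem.Dict.getD_of_not_contains d ([] : List String) (Bool.eq_false_iff.mpr h)]
  · have hne : (pvLabel x == c) = false := by
      simp only [beq_eq_false_iff_ne, ne_eq]
      exact fun hh => hc hh.symm
    by_cases h : d.contains (pvLabel x) = true <;>
      simp [pvStepA, h, hc, hne, PySem.Dict.getD_modify, PySem.Dict.getD_insert]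

theorem pvFold_getD (xs : List String) (d : PySem.Dict String (List String)) (c : String) :
    (xs.foldl pvStepA d).getD c [] = d.getD c [] ++ xs.filter (fun f => pvLabel f == c) := by
  induction xs generalizing d with
  | nil => simp
  | cons x xs ih =>
    simp only [List.foldl_cons, List.filter_cons, ih, pvStepA_getD]
    by_cases h : pvLabel x == c <;> simp [h]

theorem pvStepA_keys (d : PySem.Dict String (List String)) (x : String) :
    (pvStepA d x).keys = PySem.Set.add d.keys (pvLabel x) := by
  by_cases h : d.contains (pvLabel x) = true
  · simp only [pvStepA, h, if_true]
    rw [PySem.Dict.keys_modify, PySem.Dict.keys_insert_of_contains d _ h]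
    have hm : pvLabel x ∈ d.keys := (PySem.Dict.contains_iff_mem_keys d _).mp h
    simp [PySem.Set.add, hm]
  · have hb : d.contains (pvLabel x) = false := Bool.eq_false_iff.mpr h
    simp only [pvStepA, hb, Bool.false_eq_true, if_false]
    rw [PySem.Dict.keys_modify,
      PySem.Dict.keys_insert_of_contains _ _ (by simp),
      PySem.Dict.keys_insert_of_not_contains d _ hb]
    have hm : pvLabel x ∉ d.keys := fun hm =>
      h ((PySem.Dict.contains_iff_mem_keys d _).mpr hm)
    simp [PySem.Set.add, hm]

theorem pvFold_keys (xs : List String) (d : PySem.Dict String (List String)) :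
    (xs.foldl pvStepA d).keys = PySem.Set.update d.keys (xs.map pvLabel) := by
  induction xs generalizing d with
  | nil => rfl
  | cons x xs ih =>
    simp only [List.foldl_cons, List.map_cons, ih, pvStepA_keys]
    rfl

-- ===== VERDICT (by name: the statement is the Claim_ definition above) =====
theorem get_filename_dict_spec : Claim_equal_get_filename_dict := by
  intro xs _
  unfold Spec_get_filename_dict
  have hkeys : (xs.foldl pvStepA PySem.Dict.empty).keys
      = PySem.List.dedup (xs.map pvLabel) := by
    rw [pvFold_keys, PySem.List.dedup_eq_ofList]; rfl
  have hnd : (xs.foldl pvStepA PySem.Dict.empty).keys.Nodup := by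
    rw [hkeys]; exact PySem.List.nodup_dedup _
  rw [pvA_eq_fold, PySem.Dict.items_eq_map_keys _ hnd ([] : List String), hkeys]
  unfold get_filename_dict_alt
  apply List.map_congr_left
  intro k _
  rw [pvFold_getD]
  simp
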